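-- pv_equiv track=rewrite | github.com/jps531/ms-hs-football-playoff-engine | prefect_files/scenarios.py | consolidate_opposites
-- ===== SOURCE A (Python) =====
-- def consolidate_opposites(dicts: list[dict[str, bool]]) -> list[dict[str, bool]]:
--     """Merge pairs of dicts that differ in exactly one key's boolean value.
--
--     For each pair of dicts with the same key set that differ in only one key,
--     the differing key is dropped, producing a single merged dict.  Each input
--     dict participates in at most one merge.
--
--     Args:
--         dicts: List of boolean assignment dicts.
--
--     Returns:
--         A simplified list with merged entries replacing absorbed pairs.
--     """
--     out, used = [], set()
--     for i, d1 in enumerate(dicts):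
--         if i in used:
--             continue
--         merged = False
--         for j in range(i + 1, len(dicts)):
--             if j in used:
--                 continue
--             d2 = dicts[j]
--             if set(d1.keys()) != set(d2.keys()):
--                 continue
--             dif = [k for k in d1 if d1[k] != d2[k]]
--             if len(dif) == 1:
--                 kdiff = dif[0]
--                 nd = {k: v for k, v in d1.items() if k != kdiff}
--                 out.append(nd)
--                 used.update({i, j})
--                 merged = True
--                 break
--         if not merged:
--             out.append(d1)
--     return out
-- ===== SOURCE B (Python) =====
-- def consolidate_opposites(dicts: list[dict[str, bool]]) -> list[dict[str, bool]]:
--     """Merge pairs of dicts that differ in exactly one key's boolean value.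
--
--     Alternative strategy: each dict gets a canonical sorted-item signature once;
--     the pair test is a single aligned scan over two signatures, and the greedy
--     pairing works by find-and-remove on the remaining list instead of index
--     loops over a used set.
--     """
--
--     def match1(s1, s2):
--         # key at which aligned signatures differ in exactly one value, else None
--         if len(s1) != len(s2):
--             return None
--         kdiff = None
--         for (k1, v1), (k2, v2) in zip(s1, s2):
--             if k1 != k2:
--                 return None
--             if v1 != v2:
--                 if kdiff is not None:
--                     return None
--                 kdiff = k1
--         return kdiff
--
--     def find_rm(s1, pairs):
--         # first partner of s1 in pairs: (kdiff, pairs with that partner removed)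
--         for idx, (_, s2) in enumerate(pairs):
--             k = match1(s1, s2)
--             if k is not None:
--                 return k, pairs[:idx] + pairs[idx + 1:]
--         return None
--
--     pairs = [(d, sorted(d.items())) for d in dicts]
--     out = []
--     while pairs:
--         (d1, s1), rest = pairs[0], pairs[1:]
--         found = find_rm(s1, rest)
--         if found is not None:
--             k, rest = found
--             out.append({kk: v for kk, v in d1.items() if kk != k})
--         else:
--             out.append(d1)
--         pairs = rest
--     return out
-- ===== Notes on version B (the rewrite author's own statement) =====
-- stated objective: faster
-- what changed: Replaced the index-based nested loops with a used-index set by a find-and-remove recursion over the remaining list, and replaced the per-pair key-set comparison plus per-key dict lookups by a single early-exit aligned scan over canonical sorted-item signatures computed once per dict.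
import Mathlib
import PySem

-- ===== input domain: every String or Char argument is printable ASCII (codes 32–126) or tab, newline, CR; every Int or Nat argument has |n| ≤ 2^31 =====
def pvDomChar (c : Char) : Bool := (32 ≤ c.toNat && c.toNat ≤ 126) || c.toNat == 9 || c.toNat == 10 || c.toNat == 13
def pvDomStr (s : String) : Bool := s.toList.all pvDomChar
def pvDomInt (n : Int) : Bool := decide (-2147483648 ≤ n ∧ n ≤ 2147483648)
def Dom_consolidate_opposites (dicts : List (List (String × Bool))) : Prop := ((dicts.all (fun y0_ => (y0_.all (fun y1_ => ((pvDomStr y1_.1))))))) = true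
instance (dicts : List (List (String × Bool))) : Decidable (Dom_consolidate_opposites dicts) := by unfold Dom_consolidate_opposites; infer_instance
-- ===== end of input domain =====

-- B replaces A's index loops + used set by find-and-remove recursion over sorted-item
-- signatures; equivalence of the two greedy pairings is proved on dict-shaped inputs.

-- ===== PORT A =====

-- d.keys()
def pvKeysA (d : List (String × Bool)) : List String := d.map Prod.fst

-- d[k] (keys always present at the call sites; KeyError cannot occur there)
def pvGetA (d : List (String × Bool)) (k : String) : Bool :=
  ((PySem.Dict.mk d).get? k).getD false

-- the body of A's inner j-iteration after the 'j in used' test: key-set test, dif, len(dif)==1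
def pvMergeKeyA (d1 d2 : List (String × Bool)) : Option String :=
  if ¬ (PySem.Set.equal (PySem.Set.ofList (pvKeysA d1)) (PySem.Set.ofList (pvKeysA d2)) = true) then none
  else
    let dif := (pvKeysA d1).filter (fun k => pvGetA d1 k ≠ pvGetA d2 k)
    if dif.length = 1 then dif.head? else none

-- A's inner 'for j in range(i+1, len(dicts))' loop with break: returns (nd, j) on merge
def pvInnerA (dicts : List (List (String × Bool))) (d1 : List (String × Bool))
    (used : PySem.Set Nat) : Nat → Option ((List (String × Bool)) × Nat)
  | j =>
    if _h : j < dicts.length then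
      if j ∈ used then pvInnerA dicts d1 used (j + 1)
      else
        match pvMergeKeyA d1 (dicts.getD j []) with
        | some kdiff => some (d1.filter (fun p => p.1 ≠ kdiff), j)
        | none => pvInnerA dicts d1 used (j + 1)
    else none
  termination_by j => dicts.length - j

-- A's outer 'for i, d1 in enumerate(dicts)' loop, out built by cons
def pvOuterA (dicts : List (List (String × Bool))) : Nat → PySem.Set Nat → List (List (String × Bool))
  | i, used =>
    if _h : i < dicts.length then
      if i ∈ used then pvOuterA dicts (i + 1) used
      else
        match pvInnerA dicts (dicts.getD i []) used (i + 1) with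
        | some (nd, j) => nd :: pvOuterA dicts (i + 1) (PySem.Set.add (PySem.Set.add used i) j)
        | none => (dicts.getD i []) :: pvOuterA dicts (i + 1) used
    else []
  termination_by i => dicts.length - i

def consolidate_opposites (dicts : List (List (String × Bool))) : List (List (String × Bool)) :=
  pvOuterA dicts 0 PySem.Set.empty

-- ===== PORT B =====

-- sorted(d.items())
def pvSigB (d : List (String × Bool)) : List (String × Bool) :=
  PySem.List.sorted2 d (fun p => p.1) (fun p => p.2) false

-- match1's zip loop, kdiff accumulator
def pvMatch1Go : List (String × Bool) → List (String × Bool) → Option String → Option String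
  | [], _, kd => kd
  | _ :: _, [], kd => kd
  | (k1, v1) :: t1, (k2, v2) :: t2, kd =>
    if k1 ≠ k2 then none
    else if v1 ≠ v2 then
      match kd with
      | some _ => none
      | none => pvMatch1Go t1 t2 (some k1)
    else pvMatch1Go t1 t2 kd

-- match1(s1, s2)
def pvMatch1B (s1 s2 : List (String × Bool)) : Option String :=
  if s1.length ≠ s2.length then none else pvMatch1Go s1 s2 none

-- find_rm(s1, pairs)
def pvFindRmB (s1 : List (String × Bool)) :
    List ((List (String × Bool)) × (List (String × Bool))) →
    Option (String × List ((List (String × Bool)) × (List (String × Bool))))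
  | [] => none
  | (d2, s2) :: rest =>
    match pvMatch1B s1 s2 with
    | some k => some (k, rest)
    | none =>
      match pvFindRmB s1 rest with
      | some (k, r) => some (k, (d2, s2) :: r)
      | none => none

theorem pvFindRmB_length (s1 : List (String × Bool))
    (ps : List ((List (String × Bool)) × (List (String × Bool))))
    (k : String) (r : List ((List (String × Bool)) × (List (String × Bool))))
    (h : pvFindRmB s1 ps = some (k, r)) : r.length + 1 = ps.length := by
  induction ps generalizing r with
  | nil => simp [pvFindRmB] at h
  | cons p rest ih =>
    obtain ⟨d2, s2⟩ := p
    simp only [pvFindRmB] at h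
    cases hm : pvMatch1B s1 s2 with
    | some k' => rw [hm] at h; simp at h; simp [← h.2]
    | none =>
      rw [hm] at h
      cases hr : pvFindRmB s1 rest with
      | none => rw [hr] at h; simp at h
      | some kr =>
        obtain ⟨k', r'⟩ := kr
        rw [hr] at h; simp at h
        have := ih (r := r') (by rw [hr, h.1])
        simp [← h.2, ← this]

-- the main while loop over pairs
def pvGoB : List ((List (String × Bool)) × (List (String × Bool))) → List (List (String × Bool))
  | [] => []
  | (d1, s1) :: rest =>
    match hf : pvFindRmB s1 rest with
    | some (k, rest2) => (d1.filter (fun p => p.1 ≠ k)) :: pvGoB rest2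
    | none => d1 :: pvGoB rest
  termination_by ps => ps.length
  decreasing_by
  · have := pvFindRmB_length s1 rest _ _ hf; simp; omega
  · simp

def consolidate_opposites_alt (dicts : List (List (String × Bool))) : List (List (String × Bool)) :=
  pvGoB (dicts.map (fun d => (d, pvSigB d)))

-- ===== PRECONDITION & SPEC =====
-- Pre_ excludes association lists with duplicate keys inside one dict: a Python dict
-- cannot hold duplicate keys, so such lists do not represent any input A accepts.
def Pre_consolidate_opposites (dicts : List (List (String × Bool))) : Prop :=
  ∀ d ∈ dicts, (d.map Prod.fst).Nodup

instance (dicts : List (List (String × Bool))) : Decidable (Pre_consolidate_opposites dicts) := by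
  unfold Pre_consolidate_opposites; infer_instance

def pvWitness_consolidate_opposites : (List (List (String × Bool))) :=
  [[("a", true), ("b", true)], [("a", false), ("b", true)], [("c", false)]]

def Spec_consolidate_opposites (dicts : List (List (String × Bool))) (out : List (List (String × Bool))) : Prop := out = consolidate_opposites_alt dicts
instance (dicts : List (List (String × Bool))) (out : List (List (String × Bool))) : Decidable (Spec_consolidate_opposites dicts out) := by unfold Spec_consolidate_opposites; infer_instance

-- ===== CLAIM (what is proved, stated in full; the proofs are below) =====
def Claim_equal_consolidate_opposites : Prop := ∀ (dicts : List (List (String × Bool))), Dom_consolidate_opposites dicts → Pre_consolidate_opposites dicts → Spec_consolidate_opposites dicts (consolidate_opposites dicts)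

-- ===== LEMMAS AND PROOFS =====

-- A-side semantic intermediate: find-and-remove using A's pair test
def pvFindRmA (d1 : List (String × Bool)) :
    List (List (String × Bool)) → Option (String × List (List (String × Bool)))
  | [] => none
  | d2 :: rest =>
    match pvMergeKeyA d1 d2 with
    | some k => some (k, rest)
    | none =>
      match pvFindRmA d1 rest with
      | some (k, r) => some (k, d2 :: r)
      | none => none

theorem pvFindRmA_length (d1 : List (String × Bool)) (ds : List (List (String × Bool)))
    (k : String) (r : List (List (String × Bool)))
    (h : pvFindRmA d1 ds = some (k, r)) : r.length + 1 = ds.length := by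
  induction ds generalizing r with
  | nil => simp [pvFindRmA] at h
  | cons d2 rest ih =>
    simp only [pvFindRmA] at h
    cases hm : pvMergeKeyA d1 d2 with
    | some k' => rw [hm] at h; simp at h; simp [← h.2]
    | none =>
      rw [hm] at h
      cases hr : pvFindRmA d1 rest with
      | none => rw [hr] at h; simp at h
      | some kr =>
        obtain ⟨k', r'⟩ := kr
        rw [hr] at h; simp at h
        have := ih (r := r') (by rw [hr, h.1])
        simp [← h.2, ← this]

def pvGA : List (List (String × Bool)) → List (List (String × Bool))
  | [] => []
  | d1 :: rest =>
    match hf : pvFindRmA d1 rest with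
    | some (k, rest2) => (d1.filter (fun p => p.1 ≠ k)) :: pvGA rest2
    | none => d1 :: pvGA rest
  termination_by ds => ds.length
  decreasing_by
  · have := pvFindRmA_length d1 rest _ _ hf; simp; omega
  · simp

theorem pvGA_cons_some (d1 : List (String × Bool)) (rest rest2 : List (List (String × Bool)))
    (k : String) (h : pvFindRmA d1 rest = some (k, rest2)) :
    pvGA (d1 :: rest) = (d1.filter (fun p => p.1 ≠ k)) :: pvGA rest2 := by
  rw [pvGA]
  split
  · rename_i k' r' heq
    rw [h] at heq
    simp_all
  · rename_i heq
    rw [h] at heq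
    simp at heq

theorem pvGA_cons_none (d1 : List (String × Bool)) (rest : List (List (String × Bool)))
    (h : pvFindRmA d1 rest = none) :
    pvGA (d1 :: rest) = d1 :: pvGA rest := by
  rw [pvGA]
  split
  · rename_i k' r' heq
    rw [h] at heq
    simp at heq
  · rfl

-- ===== test equivalence: pvMergeKeyA = pvMatch1B ∘ signatures, for nodup-key dicts =====

-- insertBy with any "before" that is compatible with a key order preserves Pairwise ≤
theorem insertBy_pairwise_of {α κ : Type} [LinearOrder κ] (key : α → κ)
    (before : α → α → Bool) (hb : ∀ a b, before a b = true → key a ≤ key b)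
    (hb2 : ∀ a b, before a b = false → key b ≤ key a)
    (x : α) (ys : List α) (h : ys.Pairwise (fun a b => key a ≤ key b)) :
    (PySem.List.insertBy before x ys).Pairwise (fun a b => key a ≤ key b) := by
  induction ys with
  | nil => simp [PySem.List.insertBy]
  | cons y ys ih =>
    rw [List.pairwise_cons] at h
    rw [PySem.List.insertBy]
    by_cases hxy : before x y = true
    · rw [if_pos hxy]
      refine List.Pairwise.cons ?_ (List.Pairwise.cons h.1 h.2)
      intro b hb'
      rcases List.mem_cons.mp hb' with hb' | hb'
      · exact hb' ▸ hb x y hxy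
      · exact le_trans (hb x y hxy) (h.1 b hb')
    · rw [if_neg hxy]
      refine List.Pairwise.cons ?_ (ih h.2)
      intro b hb'
      rcases (PySem.List.insertBy_mem_iff before x b ys).mp hb' with hb' | hb'
      · exact hb' ▸ hb2 x y (Bool.not_eq_true _ ▸ eq_false_of_ne_true hxy)
      · exact h.1 b hb'

theorem foldl_insertBy_pairwise {α κ : Type} [LinearOrder κ] (key : α → κ)
    (before : α → α → Bool) (hb : ∀ a b, before a b = true → key a ≤ key b)
    (hb2 : ∀ a b, before a b = false → key b ≤ key a) :
    ∀ (xs acc : List α), acc.Pairwise (fun a b => key a ≤ key b) →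
      (xs.foldl (fun acc x => PySem.List.insertBy before x acc) acc).Pairwise
        (fun a b => key a ≤ key b) := by
  intro xs
  induction xs with
  | nil => intro acc h; exact h
  | cons x xs ih =>
    intro acc h
    exact ih _ (insertBy_pairwise_of key before hb hb2 x acc h)

theorem sigB_pairwise_le (d : List (String × Bool)) :
    (pvSigB d).Pairwise (fun a b => a.1 ≤ b.1) := by
  unfold pvSigB PySem.List.sorted2
  simp only [if_neg (by decide : ¬ (false = true))]
  apply foldl_insertBy_pairwise (key := fun p : String × Bool => p.1)
  · intro a b hab
    rcases Bool.or_eq_true_iff.mp hab with hab | hab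
    · exact le_of_lt (of_decide_eq_true hab)
    · have := (Bool.and_eq_true _ _).mp hab
      have hnot : ¬ (b.1 < a.1) := by
        have := this.1
        simpa using this
      exact le_of_not_gt hnot
  · intro a b hab
    rw [Bool.or_eq_false_iff] at hab
    have : ¬ (a.1 < b.1) := by simpa using hab.1
    exact le_of_not_gt this
  · exact List.Pairwise.nil

theorem sigB_perm (d : List (String × Bool)) : (pvSigB d).Perm d :=
  PySem.List.sorted2_perm d _ _ false

theorem sigB_pairwise_lt (d : List (String × Bool)) (h : (d.map Prod.fst).Nodup) :
    (pvSigB d).Pairwise (fun a b => a.1 < b.1) := by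
  have hperm : ((pvSigB d).map Prod.fst).Perm (d.map Prod.fst) := (sigB_perm d).map _
  have hnd : ((pvSigB d).map Prod.fst).Nodup := hperm.nodup_iff.mpr h
  have hne : (pvSigB d).Pairwise (fun a b => a.1 ≠ b.1) :=
    (List.pairwise_map.mp hnd)
  have hle := sigB_pairwise_le d
  exact (hle.and hne).imp (fun {a b} hab => lt_of_le_of_ne hab.1 hab.2)

theorem sigB_keys_sorted (d : List (String × Bool)) (h : (d.map Prod.fst).Nodup) :
    PySem.List.sorted (d.map Prod.fst) (fun x => x) = (pvSigB d).map Prod.fst := by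
  apply PySem.List.sorted_eq_of_perm_of_pairwise_lt
  · exact (sigB_perm d).map _
  · exact List.pairwise_map.mpr (sigB_pairwise_lt d h)

-- equal key sets (as Python sets) ↔ equal sorted key sequences, for nodup keys
theorem keys_eq_of_equal (d1 d2 : List (String × Bool))
    (h1 : (d1.map Prod.fst).Nodup) (h2 : (d2.map Prod.fst).Nodup)
    (he : PySem.Set.equal (PySem.Set.ofList (pvKeysA d1)) (PySem.Set.ofList (pvKeysA d2)) = true) :
    (pvSigB d1).map Prod.fst = (pvSigB d2).map Prod.fst := by
  have hmem := (PySem.Set.equal_iff _ _).mp he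
  have hperm : (d1.map Prod.fst).Perm (d2.map Prod.fst) := by
    apply (List.perm_ext_iff_of_nodup h1 h2).mpr
    intro x
    have := hmem x
    simpa [PySem.Set.mem_ofList, pvKeysA] using this
  rw [← sigB_keys_sorted d1 h1, ← sigB_keys_sorted d2 h2]
  exact PySem.List.sorted_eq_sorted_of_perm _ _ _ (fun a b hab => hab) hperm

theorem equal_of_keys_eq (d1 d2 : List (String × Bool))
    (hk : (pvSigB d1).map Prod.fst = (pvSigB d2).map Prod.fst) :
    PySem.Set.equal (PySem.Set.ofList (pvKeysA d1)) (PySem.Set.ofList (pvKeysA d2)) = true := by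
  apply (PySem.Set.equal_iff _ _).mpr
  intro x
  have p1 : ((pvSigB d1).map Prod.fst).Perm (d1.map Prod.fst) := (sigB_perm d1).map _
  have p2 : ((pvSigB d2).map Prod.fst).Perm (d2.map Prod.fst) := (sigB_perm d2).map _
  simp only [PySem.Set.mem_ofList, pvKeysA]
  rw [← p1.mem_iff, ← p2.mem_iff, hk]

-- values in the signature are the dict's lookups
theorem sigB_get (d : List (String × Bool)) (h : (d.map Prod.fst).Nodup) :
    ∀ p ∈ pvSigB d, pvGetA d p.1 = p.2 := by
  intro p hp
  have hpd : p ∈ d := (sigB_perm d).mem_iff.mp hp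
  obtain ⟨k, v⟩ := p
  have hget : (PySem.Dict.mk d).get? k = some v := by
    apply PySem.Dict.get?_of_mem_items
    · exact hpd
    · simpa [PySem.Dict.keys] using h
  simp [pvGetA, hget]

-- the result of match1's scan, as a function of the differing keys
def pvDiffRes (L : List String) (kd : Option String) : Option String :=
  match L, kd with
  | [], kd => kd
  | [k], none => some k
  | _, _ => none

theorem match1Go_char (d1 d2 : List (String × Bool)) :
    ∀ (s1 s2 : List (String × Bool)), s1.map Prod.fst = s2.map Prod.fst →
      (∀ p ∈ s1, pvGetA d1 p.1 = p.2) → (∀ p ∈ s2, pvGetA d2 p.1 = p.2) →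
      ∀ kd, pvMatch1Go s1 s2 kd =
        pvDiffRes ((s1.map Prod.fst).filter (fun k => pvGetA d1 k ≠ pvGetA d2 k)) kd := by
  intro s1
  induction s1 with
  | nil =>
    intro s2 hk _ _ kd
    have : s2 = [] := List.map_eq_nil_iff.mp hk.symm
    subst this
    rfl
  | cons p t1 ih =>
    intro s2 hk hv1 hv2 kd
    obtain ⟨k, v1⟩ := p
    cases s2 with
    | nil => simp at hk
    | cons q t2 =>
      obtain ⟨k2, v2⟩ := q
      simp only [List.map_cons, List.cons.injEq] at hk
      obtain ⟨rfl, hkt⟩ := hk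
      have hg1 : pvGetA d1 k = v1 := hv1 (k, v1) List.mem_cons_self
      have hg2 : pvGetA d2 k = v2 := hv2 (k, v2) List.mem_cons_self
      have hv1' : ∀ p ∈ t1, pvGetA d1 p.1 = p.2 := fun p hp => hv1 p (List.mem_cons_of_mem _ hp)
      have hv2' : ∀ p ∈ t2, pvGetA d2 p.1 = p.2 := fun p hp => hv2 p (List.mem_cons_of_mem _ hp)
      by_cases hv : v1 = v2
      · subst hv
        have hpred : (decide (pvGetA d1 k ≠ pvGetA d2 k)) = false := by
          simp [hg1, hg2]
        simp only [pvMatch1Go, if_neg (by simp : ¬ k ≠ k), if_neg (by simp : ¬ v1 ≠ v1),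
          List.map_cons, List.filter_cons, hpred]
        exact ih t2 hkt hv1' hv2' kd
      · have hpred : (decide (pvGetA d1 k ≠ pvGetA d2 k)) = true := by
          simp [hg1, hg2, hv]
        simp only [pvMatch1Go, if_neg (by simp : ¬ k ≠ k), if_pos hv,
          List.map_cons, List.filter_cons, hpred]
        rw [if_pos trivial]
        cases kd with
        | some k0 =>
          cases hL : List.filter (fun k => decide (pvGetA d1 k ≠ pvGetA d2 k)) (t1.map Prod.fst) with
          | nil => rfl
          | cons a L' => rfl
        | none =>
          rw [ih t2 hkt hv1' hv2' (some k)]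
          unfold pvDiffRes
          cases hL : List.filter (fun k => decide (pvGetA d1 k ≠ pvGetA d2 k)) (t1.map Prod.fst) with
          | nil => rfl
          | cons a L' => cases L' <;> rfl

theorem match1Go_none_of_keys_ne :
    ∀ (s1 s2 : List (String × Bool)), s1.length = s2.length →
      s1.map Prod.fst ≠ s2.map Prod.fst → ∀ kd, pvMatch1Go s1 s2 kd = none := by
  intro s1
  induction s1 with
  | nil =>
    intro s2 hl hk kd
    have : s2 = [] := by cases s2 <;> simp_all
    simp [this] at hk
  | cons p t1 ih =>
    intro s2 hl hk kd
    obtain ⟨k1, v1⟩ := p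
    cases s2 with
    | nil => simp at hl
    | cons q t2 =>
      obtain ⟨k2, v2⟩ := q
      by_cases hkk : k1 = k2
      · subst hkk
        have htk : t1.map Prod.fst ≠ t2.map Prod.fst := by
          intro hc
          exact hk (by simp [hc])
        have htl : t1.length = t2.length := by simpa using hl
        by_cases hvv : v1 = v2
        · subst hvv
          simp only [pvMatch1Go, if_neg (by simp : ¬ k1 ≠ k1), if_neg (by simp : ¬ v1 ≠ v1)]
          exact ih t2 htl htk kd
        · simp only [pvMatch1Go, if_neg (by simp : ¬ k1 ≠ k1), if_pos hvv]
          cases kd with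
          | some k0 => rfl
          | none => exact ih t2 htl htk (some k1)
      · simp only [pvMatch1Go, if_pos hkk]

theorem pvDiffRes_perm (L dif : List String) (h : L.Perm dif) :
    pvDiffRes L none = (if dif.length = 1 then dif.head? else none) := by
  cases L with
  | nil =>
    have : dif = [] := h.nil_eq.symm
    simp [this, pvDiffRes]
  | cons a L' =>
    cases L' with
    | nil =>
      have : dif = [a] := List.Perm.eq_singleton h.symm
      simp [this, pvDiffRes]
    | cons b L'' =>
      have hlen : dif.length = L''.length + 2 := by
        rw [← h.length_eq]; simp
      rw [if_neg (by omega)]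
      rfl

theorem test_equiv (d1 d2 : List (String × Bool))
    (h1 : (d1.map Prod.fst).Nodup) (h2 : (d2.map Prod.fst).Nodup) :
    pvMergeKeyA d1 d2 = pvMatch1B (pvSigB d1) (pvSigB d2) := by
  unfold pvMergeKeyA pvMatch1B
  by_cases he : PySem.Set.equal (PySem.Set.ofList (pvKeysA d1)) (PySem.Set.ofList (pvKeysA d2)) = true
  · have hk : (pvSigB d1).map Prod.fst = (pvSigB d2).map Prod.fst := keys_eq_of_equal d1 d2 h1 h2 he
    have hlen : (pvSigB d1).length = (pvSigB d2).length := by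
      have := congrArg List.length hk
      simpa using this
    rw [if_neg (show ¬¬(PySem.Set.equal (PySem.Set.ofList (pvKeysA d1)) (PySem.Set.ofList (pvKeysA d2)) = true) by simp [he])]
    rw [if_neg (show ¬((pvSigB d1).length ≠ (pvSigB d2).length) by simp [hlen])]
    rw [match1Go_char d1 d2 _ _ hk (sigB_get d1 h1) (sigB_get d2 h2) none]
    have hdifperm : ((pvSigB d1).map Prod.fst).Perm (pvKeysA d1) := (sigB_perm d1).map _
    have hfperm : (((pvSigB d1).map Prod.fst).filter (fun k => pvGetA d1 k ≠ pvGetA d2 k)).Perm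
        ((pvKeysA d1).filter (fun k => pvGetA d1 k ≠ pvGetA d2 k)) := hdifperm.filter _
    exact (pvDiffRes_perm _ _ hfperm).symm
  · rw [if_pos (by simpa using he)]
    by_cases hlen : (pvSigB d1).length = (pvSigB d2).length
    · rw [if_neg (show ¬((pvSigB d1).length ≠ (pvSigB d2).length) by simp [hlen])]
      have hk : (pvSigB d1).map Prod.fst ≠ (pvSigB d2).map Prod.fst := by
        intro hc
        exact he (equal_of_keys_eq d1 d2 hc)
      exact (match1Go_none_of_keys_ne _ _ hlen hk none).symm
    · rw [if_pos (show (pvSigB d1).length ≠ (pvSigB d2).length from hlen)]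

-- ===== B's go over signature pairs = A's semantic find-and-remove =====

theorem pvGoB_cons_some (d1 s1 : List (String × Bool))
    (rest rest2 : List ((List (String × Bool)) × (List (String × Bool)))) (k : String)
    (h : pvFindRmB s1 rest = some (k, rest2)) :
    pvGoB ((d1, s1) :: rest) = (d1.filter (fun p => p.1 ≠ k)) :: pvGoB rest2 := by
  rw [pvGoB]
  split
  · rename_i k' r' heq
    rw [h] at heq
    simp_all
  · rename_i heq
    rw [h] at heq
    simp at heq

theorem pvGoB_cons_none (d1 s1 : List (String × Bool))
    (rest : List ((List (String × Bool)) × (List (String × Bool))))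
    (h : pvFindRmB s1 rest = none) :
    pvGoB ((d1, s1) :: rest) = d1 :: pvGoB rest := by
  rw [pvGoB]
  split
  · rename_i k' r' heq
    rw [h] at heq
    simp at heq
  · rfl

theorem pvFindRmA_mem (d1 : List (String × Bool)) (ds : List (List (String × Bool)))
    (k : String) (r : List (List (String × Bool)))
    (h : pvFindRmA d1 ds = some (k, r)) : ∀ d ∈ r, d ∈ ds := by
  induction ds generalizing r with
  | nil => simp [pvFindRmA] at h
  | cons d2 rest ih =>
    simp only [pvFindRmA] at h
    cases hm : pvMergeKeyA d1 d2 with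
    | some k' =>
      rw [hm] at h
      simp at h
      intro d hd
      exact List.mem_cons_of_mem _ (h.2 ▸ hd)
    | none =>
      rw [hm] at h
      cases hr : pvFindRmA d1 rest with
      | none => rw [hr] at h; simp at h
      | some kr =>
        obtain ⟨k', r'⟩ := kr
        rw [hr] at h
        simp at h
        intro d hd
        rw [← h.2] at hd
        rcases List.mem_cons.mp hd with hd | hd
        · exact hd ▸ List.mem_cons_self
        · exact List.mem_cons_of_mem _ (ih (r := r') (by rw [hr, h.1]) d hd)

theorem findRmB_eq (d1 : List (String × Bool)) (h1 : (d1.map Prod.fst).Nodup)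
    (rest : List (List (String × Bool)))
    (hr : ∀ d ∈ rest, (d.map Prod.fst).Nodup) :
    pvFindRmB (pvSigB d1) (rest.map (fun d => (d, pvSigB d))) =
      (pvFindRmA d1 rest).map (fun p => (p.1, p.2.map (fun d => (d, pvSigB d)))) := by
  induction rest with
  | nil => rfl
  | cons d2 r ih =>
    simp only [List.map_cons, pvFindRmB, pvFindRmA]
    rw [← test_equiv d1 d2 h1 (hr d2 List.mem_cons_self)]
    cases pvMergeKeyA d1 d2 with
    | some k => simp
    | none =>
      rw [ih (fun d hd => hr d (List.mem_cons_of_mem _ hd))]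
      cases pvFindRmA d1 r with
      | none => simp
      | some p => simp

theorem goB_eq_GA (ds : List (List (String × Bool)))
    (h : ∀ d ∈ ds, (d.map Prod.fst).Nodup) :
    pvGoB (ds.map (fun d => (d, pvSigB d))) = pvGA ds := by
  induction hn : ds.length using Nat.strong_induction_on generalizing ds with
  | _ n ih =>
    cases ds with
    | nil => simp [pvGoB, pvGA]
    | cons d1 rest =>
      have h1 : (d1.map Prod.fst).Nodup := h d1 List.mem_cons_self
      have hr : ∀ d ∈ rest, (d.map Prod.fst).Nodup :=
        fun d hd => h d (List.mem_cons_of_mem _ hd)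
      have hfr := findRmB_eq d1 h1 rest hr
      cases hf : pvFindRmA d1 rest with
      | none =>
        rw [hf] at hfr
        simp only [List.map_cons]
        rw [pvGoB_cons_none _ _ _ hfr, pvGA_cons_none _ _ hf]
        rw [ih rest.length (by simp [← hn]) rest hr rfl]
      | some p =>
        obtain ⟨k, rest2⟩ := p
        rw [hf] at hfr
        simp only [Option.map_some] at hfr
        simp only [List.map_cons]
        rw [pvGoB_cons_some _ _ _ _ _ hfr, pvGA_cons_some _ _ _ _ hf]
        have hlen := pvFindRmA_length d1 rest k rest2 hf
        have hmem := pvFindRmA_mem d1 rest k rest2 hf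
        rw [ih rest2.length (by simp at hn ⊢; omega) rest2
          (fun d hd => hr d (hmem d hd)) rfl]

-- ===== simulation: A's index loops = pvGA on the alive suffix =====

-- the dicts at the not-yet-used indices from j on
def pvAlive (dicts : List (List (String × Bool))) (j : Nat) (used : PySem.Set Nat) :
    List (List (String × Bool)) :=
  ((List.range' j (dicts.length - j)).filter (fun x => decide (x ∉ used))).map
    (fun x => dicts.getD x [])

theorem pvAlive_congr (dicts : List (List (String × Bool))) (j : Nat)
    (u1 u2 : PySem.Set Nat) (h : ∀ x, j ≤ x → (x ∈ u1 ↔ x ∈ u2)) :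
    pvAlive dicts j u1 = pvAlive dicts j u2 := by
  unfold pvAlive
  congr 1
  apply List.filter_congr
  intro x hx
  have hj : j ≤ x := by rw [List.mem_range'] at hx; omega
  simp [h x hj]

theorem pvAlive_nil (dicts : List (List (String × Bool))) (j : Nat)
    (used : PySem.Set Nat) (h : dicts.length ≤ j) : pvAlive dicts j used = [] := by
  unfold pvAlive
  have : dicts.length - j = 0 := by omega
  simp [this]

theorem pvAlive_cons (dicts : List (List (String × Bool))) (j : Nat)
    (used : PySem.Set Nat) (h : j < dicts.length) (hj : j ∉ used) :
    pvAlive dicts j used = dicts.getD j [] :: pvAlive dicts (j + 1) used := by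
  unfold pvAlive
  have h1 : dicts.length - j = (dicts.length - (j + 1)) + 1 := by omega
  rw [h1, List.range'_succ]
  simp [hj]

theorem pvAlive_skip (dicts : List (List (String × Bool))) (j : Nat)
    (used : PySem.Set Nat) (h : j < dicts.length) (hj : j ∈ used) :
    pvAlive dicts j used = pvAlive dicts (j + 1) used := by
  unfold pvAlive
  have h1 : dicts.length - j = (dicts.length - (j + 1)) + 1 := by omega
  rw [h1, List.range'_succ]
  simp [hj]

theorem innerA_eq (dicts : List (List (String × Bool))) (d1 : List (String × Bool))
    (used : PySem.Set Nat) (j : Nat) :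
    (pvInnerA dicts d1 used j = none ∧ pvFindRmA d1 (pvAlive dicts j used) = none)
    ∨ ∃ k jf, j ≤ jf ∧ jf ∉ used ∧
        pvInnerA dicts d1 used j = some (d1.filter (fun p => p.1 ≠ k), jf) ∧
        pvFindRmA d1 (pvAlive dicts j used) = some (k, pvAlive dicts j (PySem.Set.add used jf)) := by
  induction hfuel : dicts.length - j generalizing j used with
  | zero =>
    have hge : dicts.length ≤ j := by omega
    left
    constructor
    · rw [pvInnerA]; simp only [dif_neg (Nat.not_lt.mpr hge)]
    · rw [pvAlive_nil dicts j used hge]; rfl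
  | succ n ih =>
    have hlt : j < dicts.length := by omega
    by_cases hj : j ∈ used
    · -- skip j
      rcases ih used (j + 1) (by omega) with ⟨h1, h2⟩ | ⟨k, jf, hle, hnu, h1, h2⟩
      · left
        constructor
        · rw [pvInnerA]; simp only [dif_pos hlt, if_pos hj, h1]
        · rw [pvAlive_skip dicts j used hlt hj]; exact h2
      · right
        refine ⟨k, jf, by omega, hnu, ?_, ?_⟩
        · rw [pvInnerA]; simp only [dif_pos hlt, if_pos hj, h1]
        · rw [pvAlive_skip dicts j used hlt hj, h2]
          have : pvAlive dicts j (PySem.Set.add used jf)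
              = pvAlive dicts (j + 1) (PySem.Set.add used jf) := by
            apply pvAlive_skip dicts j _ hlt
            rw [PySem.Set.mem_add]
            exact Or.inl hj
          rw [this]
    · cases hm : pvMergeKeyA d1 (dicts.getD j []) with
      | some kdiff =>
        right
        refine ⟨kdiff, j, le_refl j, hj, ?_, ?_⟩
        · rw [pvInnerA]; simp only [dif_pos hlt, if_neg hj, hm]
        · rw [pvAlive_cons dicts j used hlt hj]
          simp only [pvFindRmA, hm]
          have h1 : pvAlive dicts j (PySem.Set.add used j)
              = pvAlive dicts (j + 1) (PySem.Set.add used j) := by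
            apply pvAlive_skip dicts j _ hlt
            rw [PySem.Set.mem_add]
            exact Or.inr rfl
          have h2 : pvAlive dicts (j + 1) (PySem.Set.add used j)
              = pvAlive dicts (j + 1) used := by
            apply pvAlive_congr
            intro x hx
            rw [PySem.Set.mem_add]
            constructor
            · rintro (h | h)
              · exact h
              · omega
            · exact Or.inl
          rw [h1, h2]
      | none =>
        rcases ih used (j + 1) (by omega) with ⟨h1, h2⟩ | ⟨k, jf, hle, hnu, h1, h2⟩
        · left
          constructor
          · rw [pvInnerA]; simp only [dif_pos hlt, if_neg hj, hm, h1]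
          · rw [pvAlive_cons dicts j used hlt hj]
            simp only [pvFindRmA, hm, h2]
        · right
          refine ⟨k, jf, by omega, hnu, ?_, ?_⟩
          · rw [pvInnerA]; simp only [dif_pos hlt, if_neg hj, hm, h1]
          · rw [pvAlive_cons dicts j used hlt hj]
            simp only [pvFindRmA, hm, h2]
            have : pvAlive dicts j (PySem.Set.add used jf)
                = dicts.getD j [] :: pvAlive dicts (j + 1) (PySem.Set.add used jf) := by
              apply pvAlive_cons dicts j _ hlt
              rw [PySem.Set.mem_add]
              push Not
              exact ⟨hj, by omega⟩
            rw [this]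

theorem outerA_eq_GA (dicts : List (List (String × Bool))) (i : Nat) (used : PySem.Set Nat) :
    pvOuterA dicts i used = pvGA (pvAlive dicts i used) := by
  induction hfuel : dicts.length - i generalizing i used with
  | zero =>
    have hge : dicts.length ≤ i := by omega
    rw [pvOuterA]
    simp only [dif_neg (Nat.not_lt.mpr hge)]
    rw [pvAlive_nil dicts i used hge]
    simp [pvGA]
  | succ n ih =>
    have hlt : i < dicts.length := by omega
    by_cases hi : i ∈ used
    · rw [pvOuterA]
      simp only [dif_pos hlt, if_pos hi]
      rw [ih (i + 1) used (by omega), pvAlive_skip dicts i used hlt hi]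
    · rcases innerA_eq dicts (dicts.getD i []) used (i + 1) with ⟨h1, h2⟩ | ⟨k, jf, hle, hnu, h1, h2⟩
      · rw [pvOuterA]
        simp only [dif_pos hlt, if_neg hi, h1]
        rw [pvAlive_cons dicts i used hlt hi]
        rw [pvGA_cons_none _ _ h2, ih (i + 1) used (by omega)]
      · rw [pvOuterA]
        simp only [dif_pos hlt, if_neg hi, h1]
        rw [pvAlive_cons dicts i used hlt hi]
        rw [pvGA_cons_some _ _ _ _ h2]
        rw [ih (i + 1) (PySem.Set.add (PySem.Set.add used i) jf) (by omega)]
        congr 1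
        apply congrArg pvGA
        apply pvAlive_congr
        intro x hx
        rw [PySem.Set.mem_add, PySem.Set.mem_add, PySem.Set.mem_add]
        constructor
        · rintro ((h | h) | h)
          · exact Or.inl h
          · omega
          · exact Or.inr h
        · rintro (h | h)
          · exact Or.inl (Or.inl h)
          · exact Or.inr h

-- ===== VERDICT (by name: the statement is the Claim_ definition above) =====
theorem consolidate_opposites_spec : Claim_equal_consolidate_opposites := by
  intro dicts _hdom hpre
  unfold Spec_consolidate_opposites consolidate_opposites consolidate_opposites_alt
  rw [outerA_eq_GA, goB_eq_GA _ hpre]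
  congr 1
  unfold pvAlive
  simp [PySem.Set.empty]
  apply List.ext_getElem
  · simp
  · intro n h1 h2
    simp [List.getElem?_eq_getElem h2]
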